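-- pv_equiv track=rewrite | github.com/almond0115/algorithm | programmers/level-1/135808/jjh.py | solution
-- ===== SOURCE A (Python) =====
-- def solution(k, m, score):
--     answer = 0
--     score_list = []
--     # score 정렬 후 내림차순 정렬
--     score.sort(reverse=True)
--     # score 리스트 내림차순 정렬
--     # score.reverse()
--     # m개 단위로 리스트 나누기
--     for i in range(0, len(score), m):
--         score_list.append(score[i:i+m])
--
--     # 각 리스트의 가장 작은 값 추출
--     for i in range(len(score_list)):
--         if len(score_list[i]) == m:
--             answer += min(score_list[i])
--
--     return answer*m
-- ===== SOURCE B (Python) =====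
-- def solution(k, m, score):
--     score.sort()
--     total = 0
--     for i in range(len(score) % m, len(score), m):
--         total += score[i]
--     return m * total
-- ===== Notes on version B (the rewrite author's own statement) =====
-- stated objective: simpler
-- what changed: B sorts ascending (not descending), never builds the m-sized sublists and never scans one with min(): it accumulates score[i] for i = n%m, n%m+m, ... in a single strided index loop, because after an ascending sort each full group's minimum sits at those positions, with the partial group confined to the first n%m elements.
import Mathlib
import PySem

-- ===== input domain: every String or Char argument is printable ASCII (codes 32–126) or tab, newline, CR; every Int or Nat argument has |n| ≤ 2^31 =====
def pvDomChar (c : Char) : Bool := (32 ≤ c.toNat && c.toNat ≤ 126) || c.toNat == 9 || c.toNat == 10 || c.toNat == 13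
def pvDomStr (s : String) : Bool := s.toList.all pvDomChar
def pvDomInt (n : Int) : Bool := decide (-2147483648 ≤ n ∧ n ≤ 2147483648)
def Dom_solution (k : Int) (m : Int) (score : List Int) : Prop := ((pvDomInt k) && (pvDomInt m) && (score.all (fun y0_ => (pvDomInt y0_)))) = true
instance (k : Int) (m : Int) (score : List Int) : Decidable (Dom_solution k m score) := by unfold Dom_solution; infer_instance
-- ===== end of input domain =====

-- B replaces A's "sort descending, build m-sized sublists, min() each full one" by an
-- ascending sort plus one strided index loop summing score[n%m], score[n%m+m], …
-- (each full group's minimum, the partial group being the first n%m elements): simpler.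
-- Both Pythons sort `score` in place (A descending, B ascending — the in-place orders
-- DIFFER); the equivalence proved here is about the return value only.

-- ===== PORT A =====
def solution (k : Int) (m : Int) (score : List Int) : Int :=
  -- answer = 0; score_list = []; score.sort(reverse=True)
  let s := PySem.List.sorted score (fun x => x) true
  -- for i in range(0, len(score), m): score_list.append(score[i:i+m])
  let score_list := (PySem.List.pyRange 0 (PySem.List.len s) m).foldl
      (fun acc i => acc ++ [PySem.List.slice s (some i) (some (i + m))]) []
  -- for i in range(len(score_list)): if len(score_list[i]) == m: answer += min(score_list[i])
  let answer := (PySem.List.pyRange 0 (PySem.List.len score_list) 1).foldl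
      (fun acc i =>
        let c := PySem.List.pyGetD score_list i []
        if PySem.List.len c = m then acc + ((PySem.List.min? c (fun x => x)).getD 0) else acc) 0
  answer * m

-- ===== PORT B =====
def solution_alt (k : Int) (m : Int) (score : List Int) : Int :=
  -- score.sort()
  let s := PySem.List.sorted score (fun x => x) false
  -- total = 0; for i in range(len(score) % m, len(score), m): total += score[i]
  let total := (PySem.List.pyRange (PySem.Int.mod (PySem.List.len s) m) (PySem.List.len s) m).foldl
      (fun acc i => acc + PySem.List.pyGetD s i 0) 0
  m * total

-- ===== PRECONDITION & SPEC =====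
-- Pre_ excludes only m = 0, on which A raises ValueError (range step 0) and B raises ZeroDivisionError.
def Pre_solution (k : Int) (m : Int) (score : List Int) : Prop := m ≠ 0
instance (k : Int) (m : Int) (score : List Int) : Decidable (Pre_solution k m score) := by unfold Pre_solution; infer_instance
def pvWitness_solution : Int × Int × List Int := (0, 2, [5, 1, 4, 3])

def Spec_solution (k : Int) (m : Int) (score : List Int) (out : Int) : Prop := out = solution_alt k m score
instance (k : Int) (m : Int) (score : List Int) (out : Int) : Decidable (Spec_solution k m score out) := by unfold Spec_solution; infer_instance

-- ===== CLAIM (what is proved, stated in full; the proofs are below) =====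
def Claim_equal_solution : Prop := ∀ (k : Int) (m : Int) (score : List Int), Dom_solution k m score → Pre_solution k m score → Spec_solution k m score (solution k m score)

-- ===== LEMMAS AND PROOFS =====

-- A's accumulation loop "if full: answer += min(...)" as a filtered sum
theorem foldl_if_add {b : Type} (p : b → Prop) [DecidablePred p] (g : b → Int)
    (l : List b) (a : Int) :
    l.foldl (fun acc c => if p c then acc + g c else acc) a
      = a + ((l.filter (fun c => decide (p c))).map g).sum := by
  induction l generalizing a with
  | nil => simp
  | cons c t ih =>
    by_cases h : p c <;> simp [h, ih, add_assoc]

-- the running min of a descending list is its last element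
theorem foldl_min_getLast : ∀ (t : List Int) (x : Int),
    List.Pairwise (fun a b : Int => b ≤ a) (x :: t) →
    t.foldl min x = (x :: t).getLast (by simp) := by
  intro t
  induction t with
  | nil => intro x _; simp
  | cons y t' ih =>
    intro x h
    have hyx : y ≤ x := (List.pairwise_cons.mp h).1 y (by simp)
    have h' : List.Pairwise (fun a b : Int => b ≤ a) (y :: t') :=
      (List.pairwise_cons.mp h).2
    have hstep : List.foldl min x (y :: t') = List.foldl min y t' := by
      simp [List.foldl_cons, min_eq_right hyx]
    rw [hstep, ih y h']
    simp [List.getLast]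

theorem range_filter_lt (g q : Nat) (h : g ≤ q) :
    (List.range q).filter (fun k => decide (k < g)) = List.range g := by
  have hq : q = g + (q - g) := by omega
  rw [hq, List.range_add, List.filter_append]
  have h1 : (List.range g).filter (fun k => decide (k < g)) = List.range g :=
    List.filter_eq_self.mpr (by intro a ha; simpa using List.mem_range.mp ha)
  have h2 : ((List.range (q - g)).map (fun j => g + j)).filter (fun k => decide (k < g)) = [] :=
    List.filter_eq_nil_iff.mpr (by
      intro a ha
      obtain ⟨j, hj, rfl⟩ := List.mem_map.mp ha
      simp)
  rw [h1, h2, List.append_nil]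

def chunkL (s : List Int) (M k : Nat) : List Int := (s.drop (M * k)).take M

theorem slice_chunk (s : List Int) (M k : Nat) :
    PySem.List.slice s (some ((M : Int) * k)) (some ((M : Int) * k + M)) = chunkL s M k := by
  have e1 : ((M : Int) * k) = ((M * k : Nat) : Int) := by push_cast; ring
  have e2 : ((M : Int) * k + M) = ((M * k + M : Nat) : Int) := by push_cast; ring
  rw [e2, e1, PySem.List.slice_natCast]
  simp [chunkL]

theorem chunkL_length (s : List Int) (M k : Nat) :
    (chunkL s M k).length = min M (s.length - M * k) := by
  simp [chunkL]

theorem chunk_min (s : List Int) (hs : List.Pairwise (fun a b : Int => b ≤ a) s)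
    (M k : Nat) (hM : 0 < M) (h : M * k + M ≤ s.length) :
    ((PySem.List.min? (chunkL s M k) (fun x => x)).getD 0)
      = s.getD (M * k + M - 1) 0 := by
  have hp : List.Pairwise (fun a b : Int => b ≤ a) (chunkL s M k) :=
    hs.sublist ((List.take_sublist _ _).trans (List.drop_sublist _ _))
  have hlen : (chunkL s M k).length = M := by rw [chunkL_length]; omega
  have hidx0 : (chunkL s M k)[M - 1]'(by omega) = s[M * k + M - 1]'(by omega) := by
    simp only [chunkL, List.getElem_take, List.getElem_drop]
    congr 1; omega
  have hidx : (chunkL s M k)[M - 1]? = some (s[M * k + M - 1]'(by omega)) := by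
    rw [List.getElem?_eq_getElem (by omega)]
    exact congrArg some hidx0
  rw [List.getD_eq_getElem s 0 (show M * k + M - 1 < s.length by omega)]
  rcases hne : chunkL s M k with _ | ⟨x, t⟩
  · rw [hne] at hlen; simp at hlen; omega
  · rw [hne] at hp hlen hidx
    rw [PySem.List.min?_id_cons, Option.getD_some, foldl_min_getLast t x hp]
    have h3 : (x :: t)[M - 1]'(by omega) = s[M * k + M - 1]'(by omega) := by
      have h4 := List.getElem?_eq_getElem (l := x :: t) (i := M - 1) (by omega)
      rw [h4] at hidx
      exact Option.some.inj hidx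
    rw [List.getLast_eq_getElem]
    simp only [hlen]
    exact h3

-- summing a range backwards
theorem sum_map_range_reflect : ∀ (g : Nat) (f : Nat → Int),
    ((List.range g).map (fun j => f (g - 1 - j))).sum = ((List.range g).map f).sum := by
  intro g
  induction g with
  | zero => intro f; simp
  | succ g ih =>
    intro f
    have hL : (List.range (g + 1)).map (fun j => f (g + 1 - 1 - j))
        = (List.range g).map (fun j => f ((g - 1 - j) + 1)) ++ [f 0] := by
      rw [List.range_succ, List.map_append]
      congr 1
      · refine List.map_congr_left (fun j hj => ?_)
        have := List.mem_range.mp hj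
        congr 1; omega
      · simp
    rw [hL, List.sum_append,
        show ((List.range g).map (fun j => f (g - 1 - j + 1))).sum
          = ((List.range g).map (fun j => f (j + 1))).sum from ih (fun j => f (j + 1)),
        List.range_succ_eq_map, List.map_cons, List.sum_cons, List.map_map,
        show f ∘ Nat.succ = fun j => f (j + 1) from funext (fun j => rfl)]
    simp only [List.sum_cons, List.sum_nil]
    ring

-- the descending sort is the reverse of the ascending sort (identity key, Int values)
theorem desc_eq_reverse_asc (score : List Int) :
    PySem.List.sorted score (fun x => x) true
      = (PySem.List.sorted score (fun x => x) false).reverse := by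
  have h := PySem.List.eq_of_perm_of_pairwise_le_of_injective
    (l₁ := (PySem.List.sorted score (fun x => x) true).reverse)
    (l₂ := PySem.List.sorted score (fun x => x) false)
    (fun x : Int => x) (fun a b hab => hab)
    (((PySem.List.sorted score (fun x => x) true).reverse_perm.trans
        (PySem.List.sorted_perm score (fun x => x) true)).trans
      (PySem.List.sorted_perm score (fun x => x) false).symm)
    (List.pairwise_reverse.mpr (PySem.List.sorted_pairwise_rev score (fun x => x)))
    (PySem.List.sorted_pairwise score (fun x => x))
  rw [← h, List.reverse_reverse]

-- the two strided sums coincide: desc[M*j+M-1] (j < g) is asc[r + M*(g-1-j)]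
theorem sums_eq (score : List Int) (M g r : Nat) (hM : 0 < M) (hr : r < M)
    (hn : (PySem.List.sorted score (fun x => x) false).length = M * g + r) :
    ((List.range g).map (fun j =>
        (PySem.List.sorted score (fun x => x) true).getD (M * j + M - 1) 0)).sum
      = ((List.range g).map (fun j =>
        (PySem.List.sorted score (fun x => x) false).getD (r + M * j) 0)).sum := by
  set sa := PySem.List.sorted score (fun x => x) false with hsa
  rw [desc_eq_reverse_asc score, ← hsa]
  have hstep : (List.range g).map (fun j => sa.reverse.getD (M * j + M - 1) 0)
      = (List.range g).map (fun j => sa.getD (r + M * (g - 1 - j)) 0) := by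
    refine List.map_congr_left (fun j hj => ?_)
    have hjg : j < g := List.mem_range.mp hj
    have hub : M * j + M ≤ M * g := by nlinarith
    have hc : M * (g - 1 - j) = M * g - M - M * j := by
      rw [Nat.mul_sub, Nat.mul_sub, Nat.mul_one]
    have h1 : M * j + M - 1 < sa.length := by omega
    rw [List.getD_eq_getElem sa.reverse 0 (by simpa using h1),
        List.getD_eq_getElem sa 0 (show r + M * (g - 1 - j) < sa.length by omega)]
    rw [List.getElem_reverse]
    congr 1
    omega
  rw [hstep, sum_map_range_reflect g (fun j => sa.getD (r + M * j) 0)]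

theorem solution_eq (k m : Int) (score : List Int) (hm : m ≠ 0) :
    solution k m score = solution_alt k m score := by
  simp only [solution, solution_alt, PySem.List.len_eq]
  have hs : List.Pairwise (fun a b : Int => b ≤ a)
      (PySem.List.sorted score (fun x => x) true) :=
    PySem.List.sorted_pairwise_rev score (fun x => x)
  set s := PySem.List.sorted score (fun x => x) true with hsdef
  set sa := PySem.List.sorted score (fun x => x) false with hsadef
  have hlen : sa.length = s.length :=
    ((PySem.List.sorted_perm score (fun x => x) false).trans
      (PySem.List.sorted_perm score (fun x => x) true).symm).length_eq
  rcases lt_or_gt_of_ne hm with hneg | hpos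
  · -- m < 0 : both loops are empty, both sides are 0
    rw [PySem.List.pyRange_of_neg 0 (s.length : Int) hneg]
    have hnn : ¬ ((s.length : Int) < 0) := by omega
    simp only [hnn, if_false, List.range_zero, List.map_nil, List.foldl_nil]
    have hmod := PySem.Int.mod_neg_bounds (sa.length : Int) hneg
    rw [PySem.List.pyRange_of_neg (PySem.Int.mod (sa.length : Int) m) (sa.length : Int) hneg]
    have hnn2 : ¬ ((sa.length : Int) < PySem.Int.mod (sa.length : Int) m) := by
      have : (0 : Int) ≤ (sa.length : Int) := by positivity
      omega
    simp [hnn2]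
  · -- m > 0
    obtain ⟨M, rfl⟩ : ∃ M : Nat, m = (M : Int) :=
      ⟨m.toNat, (Int.toNat_of_nonneg hpos.le).symm⟩
    have hM : 0 < M := by exact_mod_cast hpos
    set n := s.length with hn
    have hdm : M * (n / M) + n % M = n := Nat.div_add_mod n M
    -- the chunk list of A
    rw [PySem.List.foldl_append_singleton_eq_map, List.nil_append,
        PySem.List.pyRange_of_pos 0 (n : Int) (by exact_mod_cast hM), List.map_map]
    set q := (if (0 : Int) < (n : Int) then (((n : Int) - 0 + M - 1) / M).toNat else 0) with hqdef
    have hchunks : (List.range q).map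
        ((fun i => PySem.List.slice s (some i) (some (i + M))) ∘ fun k : Nat => 0 + (M : Int) * (k : Int))
        = (List.range q).map (fun j => chunkL s M j) := by
      refine List.map_congr_left (fun j _ => ?_)
      simp only [Function.comp, zero_add]
      exact slice_chunk s M j
    rw [hchunks]
    -- the accumulation loop of A, as a fold over the chunk list
    rw [PySem.List.foldl_pyRange_zero_pyGetD' ((List.range q).map (fun j => chunkL s M j)) []
        (fun acc c => if (c.length : Int) = (M : Int) then
            acc + ((PySem.List.min? c (fun x => x)).getD 0) else acc) 0]
    rw [foldl_if_add (fun c : List Int => (c.length : Int) = (M : Int))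
        (fun c => (PySem.List.min? c (fun x => x)).getD 0)]
    rw [List.filter_map]
    have hcond : (List.range q).filter
        ((fun c : List Int => decide ((c.length : Int) = (M : Int))) ∘ fun j => chunkL s M j)
        = (List.range q).filter (fun j => decide (j < n / M)) := by
      refine List.filter_congr (fun j _ => ?_)
      simp only [Function.comp, decide_eq_decide, chunkL_length, Nat.cast_inj]
      have hdiv := Nat.le_div_iff_mul_le (x := j + 1) (y := n) hM
      constructor
      · intro hfull
        have h0 : M * j + M ≤ n := by omega
        have h1 : (j + 1) * M ≤ n := by rw [Nat.add_mul, one_mul, Nat.mul_comm j M]; omega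
        exact hdiv.mpr h1
      · intro hlt
        have h1 : (j + 1) * M ≤ n := hdiv.mp hlt
        have h0 : M * j + M ≤ n := by rw [Nat.add_mul, one_mul, Nat.mul_comm j M] at h1; omega
        omega
    rw [hcond]
    have hgq : n / M ≤ q := by
      rw [hqdef]
      by_cases h0 : (0 : Int) < (n : Int)
      · simp only [h0, if_true]
        have e : ((n : Int) - 0 + M - 1) = ((n + M - 1 : Nat) : Int) := by omega
        rw [e, ← Int.natCast_div, Int.toNat_natCast]
        exact Nat.div_le_div_right (by omega)
      · have hz : n = 0 := by omega
        simp [hz]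
    rw [range_filter_lt (n / M) q hgq, List.map_map]
    -- each full chunk's min is the element at index M*j+M-1 of the descending sort
    have hA : (List.range (n / M)).map
        ((fun c => (PySem.List.min? c (fun x => x)).getD 0) ∘ fun j => chunkL s M j)
        = (List.range (n / M)).map (fun j => s.getD (M * j + M - 1) 0) := by
      refine List.map_congr_left (fun j hj => ?_)
      have hjg : j < n / M := List.mem_range.mp hj
      have h1 : (j + 1) * M ≤ n := (Nat.le_div_iff_mul_le hM).mp (by omega)
      have hfull : M * j + M ≤ n := by
        rw [Nat.add_mul, one_mul, Nat.mul_comm j M] at h1; omega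
      exact chunk_min s hs M j hM hfull
    rw [hA]
    -- B's loop: the strided range and its sum
    have hmodc : PySem.Int.mod (sa.length : Int) (M : Int) = ((n % M : Nat) : Int) := by
      rw [hlen, PySem.Int.mod_natCast]
    rw [hmodc, hlen,
        PySem.List.pyRange_of_pos ((n % M : Nat) : Int) (n : Int) (by exact_mod_cast hM)]
    have hcount : (if ((n % M : Nat) : Int) < (n : Int) then
        (((n : Int) - (n % M : Nat) + M - 1) / M).toNat else 0) = n / M := by
      by_cases hrn : n % M < n
      · have hco : ((n % M : Nat) : Int) < (n : Int) := by exact_mod_cast hrn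
        rw [if_pos hco]
        have h1 : n % M ≤ n := Nat.mod_le n M
        have eNat : ((n : Int) - (n % M : Nat) + M - 1) = ((n - n % M + M - 1 : Nat) : Int) := by
          omega
        rw [eNat, ← Int.natCast_div, Int.toNat_natCast]
        have e2 : n - n % M + M - 1 = M * (n / M) + (M - 1) := by omega
        rw [e2, Nat.mul_add_div hM, Nat.div_eq_of_lt (show M - 1 < M by omega), Nat.add_zero]
      · have hle : n % M ≤ n := Nat.mod_le n M
        have hrn2 : n % M = n := by omega
        have hMg0 : M * (n / M) = 0 := by omega
        have hg0 : n / M = 0 := by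
          rcases Nat.mul_eq_zero.mp hMg0 with h | h
          · omega
          · exact h
        have hco : ¬ (((n % M : Nat) : Int) < (n : Int)) := by exact_mod_cast hrn
        rw [if_neg hco, hg0]
    rw [hcount, PySem.List.foldl_add, List.map_map, zero_add]
    -- identify B's summands with asc.getD (n%M + M*j) 0
    have hB : (List.range (n / M)).map
        ((fun i => PySem.List.pyGetD sa i 0) ∘ fun j : Nat => ((n % M : Nat) : Int) + (M : Int) * (j : Int))
        = (List.range (n / M)).map (fun j => sa.getD (n % M + M * j) 0) := by
      refine List.map_congr_left (fun j _ => ?_)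
      simp only [Function.comp]
      have e : ((n % M : Nat) : Int) + (M : Int) * (j : Int) = ((n % M + M * j : Nat) : Int) := by
        push_cast; ring
      rw [e, PySem.List.pyGetD_natCast]
    rw [hB]
    rw [sums_eq score M (n / M) (n % M) hM (Nat.mod_lt n hM)
        (by rw [hlen]; exact hdm.symm)]
    ring

-- ===== VERDICT (by name: the statement is the Claim_ definition above) =====
theorem solution_spec : Claim_equal_solution := by
  intro k m score _ hpre
  unfold Spec_solution
  exact solution_eq k m score hpre
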